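-- pv_equiv track=rewrite | github.com/sherif69-sa/DevS69-sdetkit | src/sdetkit/inspect_data.py | _find_record_id_field
-- ===== SOURCE A (Python) =====
-- from typing import Any
--
-- def _find_record_id_field(rows: list[dict[str, Any]]) -> str | None:
--     if not rows:
--         return None
--     preferred = ("id", "record_id", "user_id", "order_id", "account_id")
--     keys = set().union(*(row.keys() for row in rows if isinstance(row, dict)))
--     for field in preferred:
--         if field in keys:
--             return field
--     return None
-- ===== SOURCE B (Python) =====
-- def _find_record_id_field(rows):
--     if not rows:
--         return None
--     preferred = ("id", "record_id", "user_id", "order_id", "account_id")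
--     for field in preferred:
--         if any(isinstance(row, dict) and field in row for row in rows):
--             return field
--     return None
-- ===== Notes on version B (the rewrite author's own statement) =====
-- stated objective: simpler
-- what changed: B drops the union-of-all-keys set: it loops over the preferred fields in order and scans the rows directly per field, returning the first field some dict row contains.
import Mathlib
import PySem

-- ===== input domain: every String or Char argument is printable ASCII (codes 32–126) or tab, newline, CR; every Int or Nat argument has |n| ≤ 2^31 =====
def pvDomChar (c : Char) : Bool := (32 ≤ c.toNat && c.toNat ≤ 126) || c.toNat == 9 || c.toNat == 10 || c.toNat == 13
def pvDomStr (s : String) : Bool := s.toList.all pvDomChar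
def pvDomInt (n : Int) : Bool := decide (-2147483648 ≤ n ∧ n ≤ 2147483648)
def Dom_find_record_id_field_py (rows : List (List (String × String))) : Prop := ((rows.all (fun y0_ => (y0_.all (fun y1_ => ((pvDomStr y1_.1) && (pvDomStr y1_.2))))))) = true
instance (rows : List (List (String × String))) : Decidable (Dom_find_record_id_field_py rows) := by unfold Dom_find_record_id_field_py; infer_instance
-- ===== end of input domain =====

-- B replaces A's union-of-all-keys set with a per-field scan of the rows: simpler, same result.
-- ===== PORT A =====
-- loop 'for field in preferred: if field in keys: return field' of A
def pvLoopA (keys : PySem.Set String) : List String → Option String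
  | [] => none
  | f :: rest => if PySem.Set.contains keys f then some f else pvLoopA keys rest

def find_record_id_field_py (rows : List (List (String × String))) : Option String :=
  if rows = [] then none
  else
    let preferred : List String := ["id", "record_id", "user_id", "order_id", "account_id"]
    let keys : PySem.Set String :=
      rows.foldl (fun s row => PySem.Set.update s ((row.map Prod.fst))) PySem.Set.empty
    pvLoopA keys preferred

-- ===== PORT B =====
-- loop 'for field in preferred: if any(field in row for row in rows): return field' of B
def pvLoopB (rows : List (List (String × String))) : List String → Option String
  | [] => none
  | f :: rest => if rows.any (fun row => (row.any (fun kv => kv.1 == f))) then some f else pvLoopB rows rest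

def find_record_id_field_py_alt (rows : List (List (String × String))) : Option String :=
  if rows = [] then none
  else pvLoopB rows ["id", "record_id", "user_id", "order_id", "account_id"]

-- ===== PRECONDITION & SPEC =====
def Spec_find_record_id_field_py (rows : List (List (String × String))) (out : Option String) : Prop := out = find_record_id_field_py_alt rows
instance (rows : List (List (String × String))) (out : Option String) : Decidable (Spec_find_record_id_field_py rows out) := by unfold Spec_find_record_id_field_py; infer_instance

-- ===== CLAIM (what is proved, stated in full; the proofs are below) =====
def Claim_equal_find_record_id_field_py : Prop := ∀ (rows : List (List (String × String))), Dom_find_record_id_field_py rows → Spec_find_record_id_field_py rows (find_record_id_field_py rows)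

-- ===== LEMMAS AND PROOFS =====

-- ===== VERDICT (by name: the statement is the Claim_ definition above) =====
-- membership in the folded union-of-keys set = some row contains the key
theorem pv_mem_fold (rows : List (List (String × String))) (s : PySem.Set String) (f : String) :
    f ∈ rows.foldl (fun s row => PySem.Set.update s ((row.map Prod.fst))) s ↔
      f ∈ s ∨ ∃ row ∈ rows, f ∈ row.map Prod.fst := by
  induction rows generalizing s with
  | nil => simp
  | cons r rs ih =>
    simp [List.foldl, ih, PySem.Set.mem_update]
    tauto

theorem pv_loop_eq (rows : List (List (String × String)))
    (keys : PySem.Set String)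
    (hk : ∀ f, PySem.Set.contains keys f = rows.any (fun row => (row.any (fun kv => kv.1 == f))))
    (pref : List String) : pvLoopA keys pref = pvLoopB rows pref := by
  induction pref with
  | nil => rfl
  | cons f rest ih =>
    simp only [pvLoopA, pvLoopB, ih, ← hk f, PySem.Set.contains_iff]

theorem find_record_id_field_py_spec : Claim_equal_find_record_id_field_py := by
  intro rows _
  unfold Spec_find_record_id_field_py find_record_id_field_py find_record_id_field_py_alt
  split_ifs with h
  · rfl
  · apply pv_loop_eq
    intro f
    rw [PySem.Set.contains_eq_listContains, Bool.eq_iff_iff]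
    simp only [List.contains_eq_mem, decide_eq_true_eq, pv_mem_fold, List.any_eq_true,
      List.mem_map, beq_iff_eq, Prod.exists]
    constructor
    · rintro (hs | ⟨row, hr, a, b, hkv, rfl⟩)
      · simp [PySem.Set.empty] at hs
      · exact ⟨row, hr, a, b, hkv, rfl⟩
    · rintro ⟨row, hr, a, b, hkv, rfl⟩
      exact Or.inr ⟨row, hr, a, b, hkv, rfl⟩
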